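-- pv_equiv track=rewrite | github.com/PTA-Avenger/litLLM | src/stylometric/text_processing.py | segment_stanzas
-- ===== SOURCE A (Python) =====
-- from typing import List, Tuple, Dict, Optional
--
-- def segment_stanzas(text: str) -> List[List[str]]:
--     """Segment poem into stanzas (groups of lines separated by blank lines).
--
--     Args:
--         text: Poetry text
--
--     Returns:
--         List of stanzas, where each stanza is a list of lines
--     """
--     if not text:
--         return []
--
--     lines = text.split('\n')
--     stanzas = []
--     current_stanza = []
--
--     for line in lines:
--         stripped_line = line.strip()
--         if stripped_line:
--             current_stanza.append(stripped_line)
--         else: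
--             # Empty line indicates stanza break
--             if current_stanza:
--                 stanzas.append(current_stanza)
--                 current_stanza = []
--
--     # Add the last stanza if it exists
--     if current_stanza:
--         stanzas.append(current_stanza)
--
--     return stanzas
-- ===== SOURCE B (Python) =====
-- def segment_stanzas(text):
--     """Segment poem into stanzas: strip all lines once, then scan runs of
--     non-blank lines with two indices (run-extraction instead of an accumulator)."""
--     if not text:
--         return []
--     stripped = [l.strip() for l in text.split('\n')]
--     out = []
--     i, n = 0, len(stripped)
--     while i < n:
--         if not stripped[i]:
--             i += 1
--         else:
--             j = i
--             while j < n and stripped[j]: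
--                 j += 1
--             out.append(stripped[i:j])
--             i = j
--     return out
-- ===== Notes on version B (the rewrite author's own statement) =====
-- stated objective: alternative
-- what changed: Replaces A's single accumulator loop (current_stanza built line by line, flushed on blanks and at the end) with a strip-all-lines pass followed by a two-index run scan that extracts each maximal non-blank run as a slice, so no pending-stanza state or final flush exists.
import Mathlib
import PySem

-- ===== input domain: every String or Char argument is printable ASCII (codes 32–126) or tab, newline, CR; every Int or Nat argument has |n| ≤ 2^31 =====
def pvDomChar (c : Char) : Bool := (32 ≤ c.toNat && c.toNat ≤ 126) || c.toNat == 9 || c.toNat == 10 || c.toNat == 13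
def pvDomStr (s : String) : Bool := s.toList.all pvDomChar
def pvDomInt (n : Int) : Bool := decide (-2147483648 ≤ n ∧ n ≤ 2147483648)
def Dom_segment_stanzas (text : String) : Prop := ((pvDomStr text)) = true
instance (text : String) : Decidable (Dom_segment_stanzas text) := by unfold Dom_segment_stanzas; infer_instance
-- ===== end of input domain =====

-- B replaces A's accumulator loop by stripping all lines once and scanning maximal
-- non-blank runs (alternative decomposition, same cost).

-- ===== PORT A =====
-- one loop step: append the stripped line to the current stanza, or flush it on a blank
def segStepA (st : List (List String) × List String) (line : String) :
    List (List String) × List String :=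
  let stripped := PySem.Str.strip line
  if stripped ≠ "" then (st.1, st.2 ++ [stripped])
  else if st.2 ≠ [] then (st.1 ++ [st.2], []) else st

def segment_stanzas (text : String) : List (List String) :=
  if text = "" then []
  else
    let lines := (PySem.Str.split? text "\n").getD []   -- sep "\n" ≠ "", so split? is always `some` here
    let r := lines.foldl segStepA ([], [])
    if r.2 ≠ [] then r.1 ++ [r.2] else r.1

-- ===== PORT B =====
-- run scan over the already-stripped lines: skip blanks, take each maximal non-blank run
def segRuns : List String → List (List String)
  | [] => []
  | s :: rest =>
    if s = "" then segRuns rest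
    else (s :: rest.takeWhile (· ≠ "")) :: segRuns (rest.dropWhile (· ≠ ""))
termination_by l => l.length
decreasing_by
  · simp
  · have := List.length_dropWhile_le (p := fun x => decide (x ≠ "")) (l := rest)
    simp at this ⊢; omega

def segment_stanzas_alt (text : String) : List (List String) :=
  if text = "" then []
  else segRuns (((PySem.Str.split? text "\n").getD []).map PySem.Str.strip)

-- ===== PRECONDITION & SPEC =====
def Spec_segment_stanzas (text : String) (out : List (List String)) : Prop := out = segment_stanzas_alt text
instance (text : String) (out : List (List String)) : Decidable (Spec_segment_stanzas text out) := by unfold Spec_segment_stanzas; infer_instance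

-- ===== CLAIM (what is proved, stated in full; the proofs are below) =====
def Claim_equal_segment_stanzas : Prop := ∀ (text : String), Dom_segment_stanzas text → Spec_segment_stanzas text (segment_stanzas text)

-- ===== LEMMAS AND PROOFS =====

-- what A's loop will still produce from a pending stanza `cur` and remaining (stripped) lines
def segEmit (cur : List String) : List String → List (List String)
  | [] => if cur = [] then [] else [cur]
  | s :: rest =>
    if s = "" then (if cur = [] then [] else [cur]) ++ segEmit [] rest
    else segEmit (cur ++ [s]) rest

theorem segEmit_eq (ls : List String) : ∀ cur : List String,
    segEmit cur ls =
      if cur = [] then segRuns ls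
      else (cur ++ ls.takeWhile (· ≠ "")) :: segRuns (ls.dropWhile (· ≠ "")) := by
  induction ls with
  | nil => intro cur; by_cases h : cur = [] <;> simp [segEmit, segRuns, h]
  | cons s rest ih =>
    intro cur
    by_cases hs : s = ""
    · by_cases h : cur = [] <;>
        simp [segEmit, segRuns, hs, h, ih, List.takeWhile, List.dropWhile]
    · by_cases h : cur = []
      · simp [segEmit, segRuns, hs, h, ih]
      · have hne : cur ++ [s] ≠ [] := by simp
        simp [segEmit, hs, h, ih, hne, List.takeWhile, List.dropWhile]

theorem foldl_segStepA (ls : List String) : ∀ (st : List (List String)) (cur : List String),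
    (let r := ls.foldl segStepA (st, cur)
     if r.2 ≠ [] then r.1 ++ [r.2] else r.1) = st ++ segEmit cur (ls.map PySem.Str.strip) := by
  induction ls with
  | nil => intro st cur; by_cases h : cur = [] <;> simp [segEmit, h]
  | cons l rest ih =>
    intro st cur
    by_cases hs : PySem.Str.strip l = ""
    · by_cases h : cur = [] <;>
        simp [segStepA, segEmit, hs, h, ih]
    · simp [segStepA, segEmit, hs, ih]

theorem segment_stanzas_spec : Claim_equal_segment_stanzas := by
  intro text _
  unfold Spec_segment_stanzas segment_stanzas segment_stanzas_alt
  by_cases h : text = ""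
  · simp [h]
  · simp only [h]
    rw [foldl_segStepA]
    rw [segEmit_eq]
    simp
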